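-- pv_equiv track=rewrite | github.com/RHC826/auto_json_userscript | json2csv.py | remove_commas_between_doublequotes
-- ===== SOURCE A (Python) =====
-- def remove_commas_between_doublequotes(string: str):
--     """
--     '"' に囲まれている "," を削除して awk や split で扱いやすくする。
--     (?<=[^"]),(?=[^"]) では入れ子の json を破壊する可能性がある。
--     """
--     flg: bool = False
--     res: str = ""
--     for char in string:
--         if char == '"' and flg is False:
--             flg = True
--         elif char == '"' and flg is True:
--             flg = False
--
--         if string.count('"') > 0:
--             if char == "," and flg is False:
--                 char = "\\" + char
--             elif char == "," and flg is True:
--                 continue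
--         elif char == "," and flg is False:
--             continue
--
--         res += char
--
--     return res
-- ===== SOURCE B (Python) =====
-- def remove_commas_between_doublequotes(string: str):
--     parts = string.split('"')
--     has_quote = len(parts) > 1
--     res = []
--     inside = False
--     for part in parts:
--         if not has_quote:
--             res.append(part.replace(',', ''))
--         elif inside:
--             res.append(part.replace(',', ''))
--         else:
--             res.append(part.replace(',', '\\,'))
--         inside = not inside
--     return '"'.join(res)
-- ===== Notes on version B (the rewrite author's own statement) =====
-- stated objective: faster
-- what changed: Replaces the character-by-character loop (quote-toggled flag, per-character string concatenation and a full count scan each iteration) by splitting the string on the double-quote character and applying a single str.replace per segment (even segments outside quotes, odd inside), rejoined at the end.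
import Mathlib
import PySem

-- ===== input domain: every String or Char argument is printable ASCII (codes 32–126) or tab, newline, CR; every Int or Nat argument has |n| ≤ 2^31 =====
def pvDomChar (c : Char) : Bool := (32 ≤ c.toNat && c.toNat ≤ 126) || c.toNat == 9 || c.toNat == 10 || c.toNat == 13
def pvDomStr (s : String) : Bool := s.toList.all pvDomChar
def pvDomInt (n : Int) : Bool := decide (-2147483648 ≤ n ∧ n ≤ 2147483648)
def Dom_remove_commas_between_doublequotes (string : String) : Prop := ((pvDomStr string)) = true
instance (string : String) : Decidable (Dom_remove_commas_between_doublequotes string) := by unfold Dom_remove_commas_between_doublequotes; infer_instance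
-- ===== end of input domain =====

-- B replaces A's char-by-char loop (quote-toggled flag, res += char rebuilding the string, a full
-- count scan per char) by one split on the double quote with one str.replace per segment (even
-- segments outside quotes, odd inside), rejoined. Objective: faster (measured).

-- ===== PORT A =====
-- A's per-character loop: flg toggles on '"'; the branch structure (escape / skip / append)
-- follows A's code line by line. 'string.count('"') > 0' is loop-invariant, computed once as hq.
def pvALoop (hq : Bool) (flg : Bool) : List Char → List Char
  | [] => []
  | char :: rest =>
    let flg' := if char = '"' ∧ flg = false then true
                else if char = '"' ∧ flg = true then false
                else flg
    if hq then
      if char = ',' ∧ flg' = false then '\\' :: ',' :: pvALoop hq flg' rest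
      else if char = ',' ∧ flg' = true then pvALoop hq flg' rest
      else char :: pvALoop hq flg' rest
    else
      if char = ',' ∧ flg' = false then pvALoop hq flg' rest
      else char :: pvALoop hq flg' rest

def remove_commas_between_doublequotes (string : String) : String :=
  String.ofList (pvALoop (decide (PySem.Str.count string "\"" > 0)) false string.toList)

-- ===== PORT B =====
def remove_commas_between_doublequotes_alt (string : String) : String :=
  let parts := PySem.Chars.splitOn string.toList ['"']
  let has_quote := decide (parts.length > 1)
  let res := parts.foldl (fun (st : Bool × List (List Char)) part =>
      let processed :=
        if has_quote = false then PySem.Chars.replace part [','] []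
        else if st.1 = true then PySem.Chars.replace part [','] []
        else PySem.Chars.replace part [','] ['\\', ',']
      (!st.1, st.2 ++ [processed])) (false, ([] : List (List Char)))
  String.ofList (PySem.Chars.join ['"'] res.2)

-- ===== PRECONDITION & SPEC =====
def Spec_remove_commas_between_doublequotes (string : String) (out : String) : Prop := out = remove_commas_between_doublequotes_alt string
instance (string : String) (out : String) : Decidable (Spec_remove_commas_between_doublequotes string out) := by unfold Spec_remove_commas_between_doublequotes; infer_instance

-- ===== CLAIM (what is proved, stated in full; the proofs are below) =====
def Claim_equal_remove_commas_between_doublequotes : Prop := ∀ (string : String), Dom_remove_commas_between_doublequotes string → Spec_remove_commas_between_doublequotes string (remove_commas_between_doublequotes string)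

-- ===== LEMMAS AND PROOFS =====

-- str.replace with a one-char pattern is a flatMap over the characters
theorem pv_replace_go_eq (o : Char) (new : List Char) :
    ∀ (l : List Char) (fuel : Nat) (acc : List Char), l.length ≤ fuel →
      PySem.Chars.replace.go [o] new fuel l acc
        = acc.reverse ++ l.flatMap (fun c => if c = o then new else [c]) := by
  intro l
  induction l with
  | nil => intro fuel acc _; cases fuel <;> simp [PySem.Chars.replace.go]
  | cons c t ih =>
    intro fuel acc h
    cases fuel with
    | zero => simp at h
    | succ n =>
      by_cases hc : c = o
      · subst hc
        have hstep : PySem.Chars.replace.go [c] new (n+1) (c::t) acc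
            = PySem.Chars.replace.go [c] new n t (new.reverse ++ acc) := by
          simp [PySem.Chars.replace.go, List.isPrefixOf]
        rw [hstep, ih n _ (by simpa using h)]
        simp
      · have hoc : (o == c) = false := by simpa using Ne.symm hc
        have hstep : PySem.Chars.replace.go [o] new (n+1) (c::t) acc
            = PySem.Chars.replace.go [o] new n t (c :: acc) := by
          simp [PySem.Chars.replace.go, List.isPrefixOf, hoc]
        rw [hstep, ih n _ (by simpa using h)]
        simp [hc]

theorem pv_replace_single (o : Char) (new l : List Char) :
    PySem.Chars.replace l [o] new = l.flatMap (fun c => if c = o then new else [c]) := by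
  simp only [PySem.Chars.replace, List.isEmpty_cons, Bool.false_eq_true, if_false]
  exact pv_replace_go_eq o new l l.length [] le_rfl

-- reference form of string.split('"')
def pvSplitQ : List Char → List (List Char)
  | [] => [[]]
  | c :: rest => if c = '"' then [] :: pvSplitQ rest else (pvSplitQ rest).modifyHead (c :: ·)

theorem pvSplitQ_ne_nil (l : List Char) : pvSplitQ l ≠ [] := by
  cases l with
  | nil => simp [pvSplitQ]
  | cons c rest =>
    simp only [pvSplitQ]
    split_ifs <;> simp [List.modifyHead_eq_nil_iff, pvSplitQ_ne_nil rest]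

theorem pv_splitOn_go_eq :
    ∀ (l : List Char) (fuel : Nat) (cur : List Char) (acc : List (List Char)), l.length ≤ fuel →
      PySem.Chars.splitOn.go ['"'] fuel l cur acc
        = acc.reverse ++ (pvSplitQ l).modifyHead (cur.reverse ++ ·) := by
  intro l
  induction l with
  | nil => intro fuel cur acc _; cases fuel <;> simp [PySem.Chars.splitOn.go, pvSplitQ]
  | cons c t ih =>
    intro fuel cur acc h
    cases fuel with
    | zero => simp at h
    | succ n =>
      by_cases hc : c = '"'
      · subst hc
        have hstep : PySem.Chars.splitOn.go ['"'] (n+1) ('"'::t) cur acc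
            = PySem.Chars.splitOn.go ['"'] n t [] (cur.reverse :: acc) := by
          simp [PySem.Chars.splitOn.go, List.isPrefixOf]
        rw [hstep, ih n _ _ (by simpa using h)]
        simp only [pvSplitQ, if_pos rfl, List.reverse_cons, List.append_assoc,
          List.singleton_append, List.modifyHead_cons, List.reverse_nil, List.nil_append]
        cases hsq : pvSplitQ t <;> simp
      · have hoc : ('"' == c) = false := by simpa using Ne.symm hc
        have hstep : PySem.Chars.splitOn.go ['"'] (n+1) (c::t) cur acc
            = PySem.Chars.splitOn.go ['"'] n t (c :: cur) acc := by
          simp [PySem.Chars.splitOn.go, List.isPrefixOf, hoc]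
        rw [hstep, ih n _ _ (by simpa using h)]
        rcases hne : pvSplitQ t with _ | ⟨p, ps⟩
        · exact absurd hne (pvSplitQ_ne_nil t)
        · simp [pvSplitQ, hc, hne]

theorem pv_splitOn_eq (l : List Char) : PySem.Chars.splitOn l ['"'] = pvSplitQ l := by
  simp only [PySem.Chars.splitOn]
  rw [pv_splitOn_go_eq l (l.length + 1) [] [] (by omega)]
  rcases hne : pvSplitQ l with _ | ⟨p, ps⟩
  · exact absurd hne (pvSplitQ_ne_nil l)
  · simp

-- string.count('"') counts the quote characters
theorem pv_count_go_eq :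
    ∀ (l : List Char) (fuel : Nat) (acc : Nat), l.length ≤ fuel →
      PySem.Chars.count.go ['"'] fuel l acc = acc + l.count '"' := by
  intro l
  induction l with
  | nil => intro fuel acc _; cases fuel <;> simp [PySem.Chars.count.go]
  | cons c t ih =>
    intro fuel acc h
    cases fuel with
    | zero => simp at h
    | succ n =>
      by_cases hc : c = '"'
      · subst hc
        have hstep : PySem.Chars.count.go ['"'] (n+1) ('"'::t) acc
            = PySem.Chars.count.go ['"'] n t (acc + 1) := by
          simp [PySem.Chars.count.go, List.isPrefixOf]
        rw [hstep, ih n _ (by simpa using h)]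
        simp [List.count_cons]
        omega
      · have hoc : ('"' == c) = false := by simpa using Ne.symm hc
        have hstep : PySem.Chars.count.go ['"'] (n+1) (c::t) acc
            = PySem.Chars.count.go ['"'] n t acc := by
          simp [PySem.Chars.count.go, List.isPrefixOf, hoc]
        rw [hstep, ih n _ (by simpa using h)]
        simp [hc]

theorem pv_count_eq (l : List Char) : PySem.Chars.count l ['"'] = l.count '"' := by
  simp only [PySem.Chars.count, List.isEmpty_cons, Bool.false_eq_true, if_false]
  simpa using pv_count_go_eq l l.length 0 le_rfl

theorem pvSplitQ_length (l : List Char) : (pvSplitQ l).length = l.count '"' + 1 := by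
  induction l with
  | nil => simp [pvSplitQ]
  | cons c t ih =>
    simp only [pvSplitQ]
    split_ifs with hc
    · simp [hc, ih]
    · simp [hc, ih]

-- the processed parts, alternating the inside-quotes parity
def pvProc (hq flg : Bool) (p : List Char) : List Char :=
  p.flatMap (fun c => if c = ',' then (if hq && !flg then ['\\', ','] else []) else [c])

def pvBMap (hq : Bool) : Bool → List (List Char) → List (List Char)
  | _, [] => []
  | flg, p :: ps => pvProc hq flg p :: pvBMap hq (!flg) ps

theorem pv_fold_eq_bmap (hq : Bool) :
    ∀ (parts : List (List Char)) (flg : Bool) (res : List (List Char)),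
      (parts.foldl (fun (st : Bool × List (List Char)) part =>
        let processed :=
          if hq = false then PySem.Chars.replace part [','] []
          else if st.1 = true then PySem.Chars.replace part [','] []
          else PySem.Chars.replace part [','] ['\\', ',']
        (!st.1, st.2 ++ [processed])) (flg, res)).2 = res ++ pvBMap hq flg parts := by
  intro parts
  induction parts with
  | nil => intro flg res; simp [pvBMap]
  | cons p ps ih =>
    intro flg res
    simp only [List.foldl_cons]
    rw [ih]
    cases hq <;> cases flg <;> simp [pvBMap, pvProc, pv_replace_single]

theorem pv_join_head_append (x y : List Char) (l : List (List Char)) :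
    PySem.Chars.join ['"'] ((x ++ y) :: l) = x ++ PySem.Chars.join ['"'] (y :: l) := by
  cases l with
  | nil => simp [PySem.Chars.join_singleton]
  | cons z zs => simp [PySem.Chars.join_cons_cons]

-- the central equivalence: A's loop equals join of the processed split parts
theorem pv_main (hq : Bool) :
    ∀ (cs : List Char) (flg : Bool), (hq = false → flg = false ∧ '"' ∉ cs) →
      pvALoop hq flg cs = PySem.Chars.join ['"'] (pvBMap hq flg (pvSplitQ cs)) := by
  intro cs
  induction cs with
  | nil =>
    intro flg _
    simp [pvALoop, pvSplitQ, pvBMap, pvProc, PySem.Chars.join_singleton]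
  | cons c rest ih =>
    intro flg hOK
    by_cases hc : c = '"'
    · subst hc
      cases hq with
      | false => exact absurd (List.mem_cons_self ..) (hOK rfl).2
      | true =>
        have hA : pvALoop true flg ('"' :: rest) = '"' :: pvALoop true (!flg) rest := by
          cases flg <;> simp [pvALoop]
        rcases hne : pvSplitQ rest with _ | ⟨p, ps⟩
        · exact absurd hne (pvSplitQ_ne_nil rest)
        · have hS : pvSplitQ ('"' :: rest) = [] :: p :: ps := by simp [pvSplitQ, hne]
          rw [hA, hS, ih (!flg) (by intro h; exact absurd h (by simp)), hne]
          simp [pvBMap, pvProc, PySem.Chars.join_cons_cons]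
    · have hOK' : hq = false → flg = false ∧ '"' ∉ rest := by
        intro h
        exact ⟨(hOK h).1, fun hm => (hOK h).2 (List.mem_cons_of_mem _ hm)⟩
      have hA : pvALoop hq flg (c :: rest)
          = (if c = ',' then (if hq && !flg then ['\\', ','] else []) else [c])
            ++ pvALoop hq flg rest := by
        cases hq with
        | true => cases flg <;> by_cases hcm : c = ',' <;> simp [pvALoop, hc, hcm]
        | false =>
          rw [(hOK rfl).1]
          by_cases hcm : c = ',' <;> simp [pvALoop, hc, hcm]
      rcases hne : pvSplitQ rest with _ | ⟨p, ps⟩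
      · exact absurd hne (pvSplitQ_ne_nil rest)
      · have hS : pvSplitQ (c :: rest) = (c :: p) :: ps := by simp [pvSplitQ, hc, hne]
        have hP : pvProc hq flg (c :: p)
            = (if c = ',' then (if hq && !flg then ['\\', ','] else []) else [c]) ++ pvProc hq flg p := by
          simp [pvProc]
        rw [hA, hS, ih flg hOK', hne]
        simp only [pvBMap, hP, pv_join_head_append]

-- ===== VERDICT (by name: the statement is the Claim_ definition above) =====
theorem remove_commas_between_doublequotes_spec : Claim_equal_remove_commas_between_doublequotes := by
  intro s _
  show _ = _
  simp only [remove_commas_between_doublequotes, remove_commas_between_doublequotes_alt]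
  rw [pv_splitOn_eq, pv_fold_eq_bmap]
  have hcnt : PySem.Str.count s "\"" = s.toList.count '"' := by
    have : PySem.Str.count s "\"" = PySem.Chars.count s.toList ['"'] := by
      simp [PySem.Str.count]
    rw [this, pv_count_eq]
  have hqeq : decide (PySem.Str.count s "\"" > 0) = decide ((pvSplitQ s.toList).length > 1) := by
    rw [hcnt, pvSplitQ_length]
    exact decide_eq_decide.mpr (by omega)
  rw [hqeq, List.nil_append, pv_main]
  intro hfalse
  refine ⟨rfl, ?_⟩
  intro hmem
  have : 0 < (pvSplitQ s.toList).length - 1 := by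
    rw [pvSplitQ_length]
    have := List.count_pos_iff.mpr hmem
    omega
  rw [decide_eq_false_iff_not] at hfalse
  rw [pvSplitQ_length] at *
  exact hfalse (by omega)
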